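-- pv_equiv track=rewrite | github.com/sustech-cs304/team-project-25spring-36 | backend/util/path.py | path_iterate_parents
-- ===== SOURCE A (Python) =====
-- from typing import Tuple, Iterator
--
-- def path_iterate_parents(
--         path: str,
-- ) -> Iterator[str]:
--     """
--     迭代文件路径的所有父目录
--
--     参数:
--     - path: 文件路径
--
--     返回:
--     - 父目录路径的迭代器
--     """
--     while path:
--         yield path
--         idx = path.rfind("/")
--         if idx == -1:
--             return
--         path = path[:idx]
-- ===== SOURCE B (Python) =====
-- from typing import Iterator
--
-- def path_iterate_parents(
--         path: str,
-- ) -> Iterator[str]: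
--     # One backward index scan: yield the path itself, then the prefix before
--     # each '/' (skipping index 0, whose prefix would be empty).
--     if path:
--         yield path
--     for i in range(len(path) - 1, 0, -1):
--         if path[i] == "/":
--             yield path[:i]
-- ===== Notes on version B (the rewrite author's own statement) =====
-- stated objective: simpler
-- what changed: Replaces A's repeated rfind-and-slice while-loop (re-scanning a shrinking string for its last separator) with a single backward index scan over the original string that yields the path and then the prefix before each separator position except 0.
import Mathlib
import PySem

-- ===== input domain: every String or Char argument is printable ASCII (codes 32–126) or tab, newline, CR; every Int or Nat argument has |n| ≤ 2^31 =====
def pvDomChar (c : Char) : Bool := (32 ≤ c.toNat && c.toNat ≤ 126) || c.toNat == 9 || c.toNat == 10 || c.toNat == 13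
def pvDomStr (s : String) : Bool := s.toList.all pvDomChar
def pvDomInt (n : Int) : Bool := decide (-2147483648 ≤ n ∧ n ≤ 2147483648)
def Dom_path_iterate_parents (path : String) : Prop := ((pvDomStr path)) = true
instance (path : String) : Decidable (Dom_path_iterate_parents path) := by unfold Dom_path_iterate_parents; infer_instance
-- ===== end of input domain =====

-- B replaces A's repeated rfind-and-slice loop with a single backward index
-- scan that yields the prefix before each '/' (objective: simpler).
-- Both versions are generators in Python; they are ported as the list of
-- yielded strings, computed on String.toList per the PySem convention.

-- ===== PORT A =====
-- facts about rfind needed only for the termination of the A-loop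
theorem pvPrefixSlash (l : List Char) : (['/'].isPrefixOf l = true) ↔ l[0]? = some '/' := by
  cases l with
  | nil => simp [List.isPrefixOf]
  | cons h t => simp [List.isPrefixOf]; exact eq_comm

theorem pvGoBounds (s : List Char) (i : Nat)
    (h : PySem.Chars.rfind.go s ['/'] i ≠ -1) :
    ∃ j : Nat, PySem.Chars.rfind.go s ['/'] i = (j : Int) ∧ j ≤ i ∧
      s[j]? = some '/' ∧ ∀ k : Nat, j < k → k ≤ i → s[k]? ≠ some '/' := by
  induction i with
  | zero =>
    simp only [PySem.Chars.rfind.go] at h ⊢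
    by_cases hp : (['/'].isPrefixOf s) = true
    · exact ⟨0, by simp [hp], le_refl 0, (pvPrefixSlash s).mp hp, by omega⟩
    · simp [hp] at h
  | succ i ih =>
    simp only [PySem.Chars.rfind.go] at h ⊢
    by_cases hp : (['/'].isPrefixOf (s.drop (i+1))) = true
    · refine ⟨i+1, by simp [hp], le_refl _, ?_, by omega⟩
      have := (pvPrefixSlash _).mp hp
      simpa using this
    · simp only [hp] at h ⊢
      obtain ⟨j, hj, hji, hs, hmax⟩ := ih h
      refine ⟨j, hj, by omega, hs, ?_⟩
      intro k hk1 hk2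
      rcases Nat.lt_or_ge k (i+1) with hlt | hge
      · exact hmax k hk1 (by omega)
      · have hk : k = i + 1 := by omega
        subst hk
        intro hc
        exact hp ((pvPrefixSlash _).mpr (by simpa using hc))

theorem pvRfindSpec (s : List Char) (h : PySem.Chars.rfind s ['/'] ≠ -1) :
    ∃ j : Nat, PySem.Chars.rfind s ['/'] = (j : Int) ∧ j < s.length ∧
      s[j]? = some '/' ∧ ∀ k : Nat, j < k → s[k]? ≠ some '/' := by
  rw [PySem.Chars.rfind] at h ⊢
  obtain ⟨j, hj, hji, hs, hmax⟩ := pvGoBounds s s.length h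
  have hjl : j < s.length := (List.getElem?_eq_some_iff.mp hs).1
  refine ⟨j, hj, hjl, hs, ?_⟩
  intro k hk
  rcases Nat.lt_or_ge k s.length with hlt | hge
  · exact hmax k hk (by omega)
  · simp [List.getElem?_eq_none_iff.mpr hge]

-- literal port of A's while-loop: yield the path, cut at the last '/', repeat
def pvALoop (cs : List Char) : List (List Char) :=
  if cs.isEmpty then []
  else
    let idx := PySem.Chars.rfind cs ['/']
    if h : idx = -1 then [cs]
    else cs :: pvALoop (PySem.Chars.slice cs none (some idx))
termination_by cs.length
decreasing_by
  obtain ⟨j, hj, hjl, _, _⟩ := pvRfindSpec cs h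
  simp only [PySem.Chars.slice, hj, PySem.List.slice_to _ (Int.natCast_nonneg j)]
  simp [Int.toNat_natCast]
  omega

def path_iterate_parents (path : String) : List String :=
  (pvALoop path.toList).map String.ofList

-- ===== PORT B =====
-- Source B's index list: range(len(path)-1, 0, -1) filtered to the '/'-positions
-- (the index is always in range there, so pyGet? never returns none)
def pvBIdx (cs : List Char) : List Int :=
  (PySem.List.pyRange (PySem.Chars.len cs - 1) 0 (-1)).filter
    (fun i => PySem.List.pyGet? cs i == some '/')

def pvBLoop (cs : List Char) : List (List Char) :=
  (if cs.isEmpty then [] else [cs]) ++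
    (pvBIdx cs).map (fun i => PySem.Chars.slice cs none (some i))

def path_iterate_parents_alt (path : String) : List String :=
  (pvBLoop path.toList).map String.ofList

-- ===== PRECONDITION & SPEC =====
def Spec_path_iterate_parents (path : String) (out : List String) : Prop := out = path_iterate_parents_alt path
instance (path : String) (out : List String) : Decidable (Spec_path_iterate_parents path out) := by unfold Spec_path_iterate_parents; infer_instance

-- ===== CLAIM (what is proved, stated in full; the proofs are below) =====
def Claim_equal_path_iterate_parents : Prop := ∀ (path : String), Dom_path_iterate_parents path → Spec_path_iterate_parents path (path_iterate_parents path)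

-- ===== LEMMAS AND PROOFS =====

theorem pvGoNeNeg (s : List Char) (j i : Nat) (hj : j ≤ i) (hs : s[j]? = some '/') :
    PySem.Chars.rfind.go s ['/'] i ≠ -1 := by
  induction i with
  | zero =>
    have hj0 : j = 0 := by omega
    subst hj0
    simp [PySem.Chars.rfind.go, (pvPrefixSlash s).mpr hs]
  | succ i ih =>
    simp only [PySem.Chars.rfind.go]
    by_cases hp : (['/'].isPrefixOf (s.drop (i+1))) = true
    · simp [hp]; omega
    · simp only [hp]
      rcases Nat.lt_or_ge j (i+1) with hlt | hge
      · exact ih (by omega)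
      · have : j = i + 1 := by omega
        subst this
        exact absurd ((pvPrefixSlash _).mpr (by simpa using hs)) hp

theorem pvRfindNeg (s : List Char) (h : PySem.Chars.rfind s ['/'] = -1) (j : Nat) :
    s[j]? ≠ some '/' := by
  intro hs
  have hjl : j < s.length := (List.getElem?_eq_some_iff.mp hs).1
  exact pvGoNeNeg s j s.length (by omega) hs (by rw [PySem.Chars.rfind] at h; exact h)

-- the ascending form of B's slash-index list
theorem pvBIdx_eq_reverse (cs : List Char) :
    pvBIdx cs = ((PySem.List.pyRange 1 (cs.length : Int)).filter
      (fun i => PySem.List.pyGet? cs i == some '/')).reverse := by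
  rw [pvBIdx, PySem.List.pyRange_neg_one_eq_reverse, List.filter_reverse]
  have : PySem.Chars.len cs - 1 + 1 = (cs.length : Int) := by
    simp [PySem.Chars.len]
  rw [this]
  norm_num

theorem pvMain (cs : List Char) : pvALoop cs = pvBLoop cs := by
  induction hn : cs.length using Nat.strong_induction_on generalizing cs with
  | _ n ih =>
  subst hn
  by_cases hnil : cs.isEmpty
  · rw [pvALoop, pvBLoop, pvBIdx_eq_reverse]
    have : cs = [] := List.isEmpty_iff.mp hnil
    subst this
    simp [hnil, PySem.List.pyRange_one_eq_nil]
  · by_cases hneg : PySem.Chars.rfind cs ['/'] = -1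
    · -- no '/' in cs: both sides are [cs]
      rw [pvALoop, pvBLoop, pvBIdx_eq_reverse]
      have hfil : (PySem.List.pyRange 1 (cs.length : Int)).filter
          (fun i => PySem.List.pyGet? cs i == some '/') = [] := by
        rw [List.filter_eq_nil_iff]
        intro i hi
        obtain ⟨h1, _⟩ := PySem.List.mem_pyRange_one.mp hi
        have hi0 : (0:Int) ≤ i := by omega
        rw [show i = ((i.toNat : Nat) : Int) from (Int.toNat_of_nonneg hi0).symm,
          PySem.List.pyGet?_natCast]
        simpa using pvRfindNeg cs hneg i.toNat
      simp [hnil, hneg, hfil]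
    · obtain ⟨j, hj, hjl, hs, hmax⟩ := pvRfindSpec cs hneg
      have hslice : PySem.Chars.slice cs none (some (PySem.Chars.rfind cs ['/'])) =
          cs.take j := by
        simp [PySem.Chars.slice, hj, PySem.List.slice_to _ (Int.natCast_nonneg j)]
      rw [pvALoop]
      simp only [hnil, Bool.false_eq_true, if_false, hneg, dite_false, hslice]
      by_cases hj0 : j = 0
      · -- the only '/' is at index 0: both sides are [cs]
        subst hj0
        have hfil : (PySem.List.pyRange 1 (cs.length : Int)).filter
            (fun i => PySem.List.pyGet? cs i == some '/') = [] := by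
          rw [List.filter_eq_nil_iff]
          intro i hi
          obtain ⟨h1, _⟩ := PySem.List.mem_pyRange_one.mp hi
          have hi0 : (0:Int) ≤ i := by omega
          rw [show i = ((i.toNat : Nat) : Int) from (Int.toNat_of_nonneg hi0).symm,
            PySem.List.pyGet?_natCast]
          simpa using hmax i.toNat (by omega)
        rw [pvALoop]
        simp only [List.take_zero, List.isEmpty_nil, if_true]
        rw [pvBLoop, pvBIdx_eq_reverse, hfil]
        simp [hnil]
      · -- j ≥ 1: B's index list splits as slashes-of-(take j cs) ++ [j]
        have hj1 : 1 ≤ j := by omega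
        have htlen : (cs.take j).length = j := by
          simp [List.length_take]; omega
        -- the filters agree on pyRange 1 j
        have hcongr : (PySem.List.pyRange 1 (j:Int)).filter
              (fun i => PySem.List.pyGet? cs i == some '/')
            = (PySem.List.pyRange 1 (j:Int)).filter
              (fun i => PySem.List.pyGet? (cs.take j) i == some '/') := by
          rw [List.filter_congr]
          intro i hi
          obtain ⟨h1, h2⟩ := PySem.List.mem_pyRange_one.mp hi
          have hi0 : (0:Int) ≤ i := by omega
          rw [show i = ((i.toNat : Nat) : Int) from (Int.toNat_of_nonneg hi0).symm,
            PySem.List.pyGet?_natCast, PySem.List.pyGet?_natCast,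
            List.getElem?_take_of_lt (by omega : i.toNat < j)]
        have hsplit : (PySem.List.pyRange 1 (cs.length : Int)).filter
              (fun i => PySem.List.pyGet? cs i == some '/')
            = ((PySem.List.pyRange 1 (j:Int)).filter
                (fun i => PySem.List.pyGet? (cs.take j) i == some '/')) ++ [(j:Int)] := by
          rw [PySem.List.pyRange_one_append 1 (j:Int) (cs.length : Int)
            (by exact_mod_cast hj1) (by exact_mod_cast le_of_lt hjl),
            List.filter_append, ← hcongr]
          congr 1
          rw [PySem.List.pyRange_one_cons (by exact_mod_cast hjl), List.filter_cons]
          have hpj : (PySem.List.pyGet? cs (j:Int) == some '/') = true := by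
            rw [PySem.List.pyGet?_natCast]; simpa using hs
          rw [if_pos hpj]
          have hrest : (PySem.List.pyRange ((j:Int)+1) (cs.length : Int)).filter
              (fun i => PySem.List.pyGet? cs i == some '/') = [] := by
            rw [List.filter_eq_nil_iff]
            intro i hi
            obtain ⟨h1, _⟩ := PySem.List.mem_pyRange_one.mp hi
            have hi0 : (0:Int) ≤ i := by omega
            rw [show i = ((i.toNat : Nat) : Int) from (Int.toNat_of_nonneg hi0).symm,
              PySem.List.pyGet?_natCast]
            simpa using hmax i.toNat (by omega)
          rw [hrest]
        -- maps over the common (reversed) tail agree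
        have hmap : (((PySem.List.pyRange 1 (j:Int)).filter
              (fun i => PySem.List.pyGet? (cs.take j) i == some '/')).reverse).map
              (fun i => PySem.Chars.slice (cs.take j) none (some i))
            = (((PySem.List.pyRange 1 (j:Int)).filter
              (fun i => PySem.List.pyGet? (cs.take j) i == some '/')).reverse).map
              (fun i => PySem.Chars.slice cs none (some i)) := by
          apply List.map_congr_left
          intro i hi
          have hi' := (List.mem_filter.mp (List.mem_reverse.mp hi)).1
          obtain ⟨h1, h2⟩ := PySem.List.mem_pyRange_one.mp hi'
          have hi0 : (0:Int) ≤ i := by omega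
          simp only [PySem.Chars.slice, PySem.List.slice_to _ hi0, List.take_take]
          congr 1
          omega
        have hihA : pvALoop (cs.take j) = pvBLoop (cs.take j) := by
          exact ih (cs.take j).length (by omega) (cs.take j) rfl
        rw [hihA]
        have htk : (cs.take j).isEmpty = false := by
          rw [List.isEmpty_eq_false_iff]
          intro hc
          have := congrArg List.length hc
          simp [htlen] at this
          omega
        have hjslice : PySem.Chars.slice cs none (some (j:Int)) = cs.take j := by
          simp [PySem.Chars.slice, PySem.List.slice_to _ (Int.natCast_nonneg j)]
        rw [pvBLoop, pvBLoop, pvBIdx_eq_reverse, pvBIdx_eq_reverse, htlen, hsplit,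
          List.reverse_append, htk]
        simp only [hnil, Bool.false_eq_true, if_false, List.reverse_cons,
          List.reverse_nil, List.nil_append]
        simp only [List.map_cons, List.cons_append, List.nil_append]
        rw [hjslice, hmap]

-- ===== VERDICT (by name: the statement is the Claim_ definition above) =====
theorem path_iterate_parents_spec : Claim_equal_path_iterate_parents := by
  intro path _
  unfold Spec_path_iterate_parents path_iterate_parents path_iterate_parents_alt
  rw [pvMain]
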